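-- pv_equiv track=rewrite | github.com/vjmoran/Markov-Text-Generation | hw10pr3.py | markov_model
-- ===== SOURCE A (Python) =====
-- import string
--
-- def markov_model(text, k):
--     """accepts a single (potentially large) string of text and returns a k-th order Markov model dictionary based on that text"""
--     model = {}
--     words = text.split()
--     sequences = []
--     startTupe = ()
--     firstWords = []
--     for i in range(k):
--         startTupe += ('$',)
--     for w in range(len(words) - 1):
--         if words[w-1][-1:] in string.punctuation:
--             firstWords += [words[w]]
--     model[startTupe] = firstWords
--
--     for w in range(len(words)- k):
--         initWords = ()
--         for index in range(k):
--             if words[w + index][-1:] in string.punctuation: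
--                 initWords = ()
--                 for i in range(index + 1):
--                     initWords += ('$',)
--             else:
--                 initWords += (words[w+index],)
--         for i in range(k):
--             if initWords[k-1][-1:] in string.punctuation:
--                 break
--             elif initWords in sequences:
--                 break
--             else:
--                 sequences += [initWords]
--     for s in sequences:
--         followWords = []
--         for w in range(len(words)):
--             numEqual = 0
--             for i in range(1, k+1):
--                 if s[k-i] == '$':
--                     if s[k-i+1] == '$':
--                         numEqual += 1
--                     elif i > 1 and words[w-i][-1:] in string.punctuation:
--                         numEqual += 1
--                 elif words[w-i] == s[k-i]:
--                     numEqual += 1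
--             if numEqual == k:
--                 followWords += [words[w]]
--         model[s] = followWords
--
--     return model
-- ===== SOURCE B (Python) =====
-- import string
--
-- def markov_model(text, k):
--     """accepts a single (potentially large) string of text and returns a k-th order Markov model dictionary based on that text"""
--     words = text.split()
--     n = len(words)
--     model = {('$',) * k: [words[w] for w in range(n - 1)
--                                   if words[w - 1][-1:] in string.punctuation]}
--     # collect the distinct contexts, in first-appearance order (set for dedup)
--     seen = set()
--     sequences = []
--     for w in range(n - k):
--         j = 0
--         for index in range(k):
--             if words[w + index][-1:] in string.punctuation:
--                 j = index + 1
--         s = ('$',) * j + tuple(words[w + j:w + k])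
--         if k > 0 and s[-1][-1:] not in string.punctuation and s not in seen:
--             seen.add(s)
--             sequences.append(s)
--     # single pass over positions: compute each position's candidate contexts
--     # and append the word to their follower lists via a dict lookup
--     followers = {s: [] for s in sequences}
--     if sequences:
--         for w in range(n):
--             cands = []
--             for j in range(k):  # j = number of leading '$' of the candidate
--                 if j == 0 or words[w - k + j - 1][-1:] in string.punctuation:
--                     c = ('$',) * j + tuple(words[w - k + j + t] for t in range(k - j))
--                     if c not in cands:
--                         cands.append(c)
--             for c in cands:
--                 if c in followers:
--                     followers[c].append(words[w])
--     for s in sequences: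
--         model[s] = followers[s]
--     return model
-- ===== Notes on version B (the rewrite author's own statement) =====
-- stated objective: faster
-- what changed: B dedups contexts with a set instead of A's linear 'in sequences' scan per window, and replaces A's per-context full scan of all words (with a k-term match count per pair) by a single pass over positions that computes each position's candidate contexts and appends the word to their follower lists via one dict lookup.
import Mathlib
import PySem

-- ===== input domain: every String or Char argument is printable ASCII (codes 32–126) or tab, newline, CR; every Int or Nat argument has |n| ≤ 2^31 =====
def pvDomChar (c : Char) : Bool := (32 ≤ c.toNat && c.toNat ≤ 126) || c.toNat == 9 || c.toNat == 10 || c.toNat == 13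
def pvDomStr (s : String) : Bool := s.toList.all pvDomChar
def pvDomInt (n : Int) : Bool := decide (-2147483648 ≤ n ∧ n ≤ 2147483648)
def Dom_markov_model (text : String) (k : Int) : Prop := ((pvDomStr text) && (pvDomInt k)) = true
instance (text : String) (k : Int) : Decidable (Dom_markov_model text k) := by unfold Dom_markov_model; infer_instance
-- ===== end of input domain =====

-- B replaces A's quadratic passes (a linear `in sequences` scan per window, and one
-- full scan of all words per recorded context) by a set for dedup and a single pass
-- over positions that feeds each word to its candidate contexts through a dict.

-- ===== PORT A =====
-- shared by both ports: text.split() and Python's  x[-1:] in string.punctuation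
def pvWords (text : String) : List String := PySem.Str.split₀ text
def pvPunct : String := "!\"#$%&'()*+,-./:;<=>?@[\\]^_`{|}~"
def pvLastPunct (s : String) : Bool := PySem.Str.isIn (PySem.Str.slice s (some (-1)) none) pvPunct

-- A's  for i in range(m): t += ('$',)
def pvDollars (m : Int) : List String := (PySem.List.pyRange 0 m 1).foldl (fun t _ => t ++ ["$"]) []

def pvFirstA (ws : List String) : List String :=
  (PySem.List.pyRange 0 ((ws.length : Int) - 1) 1).foldl
    (fun fw w => if pvLastPunct (PySem.List.pyGetD ws (w - 1) "") then fw ++ [PySem.List.pyGetD ws w ""] else fw) []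

def pvInitWords (ws : List String) (k w : Int) : List String :=
  (PySem.List.pyRange 0 k 1).foldl
    (fun iw index =>
      if pvLastPunct (PySem.List.pyGetD ws (w + index) "") then pvDollars (index + 1)
      else iw ++ [PySem.List.pyGetD ws (w + index) ""]) []

-- A's  for i in range(k): if …: break / elif …: break / else: sequences += [initWords]
def pvAddSeq (k : Int) (iw : List String) : Nat → List (List String) → List (List String)
  | 0, seqs => seqs
  | n + 1, seqs =>
    if pvLastPunct (PySem.List.pyGetD iw (k - 1) "") then seqs
    else if iw ∈ seqs then seqs
    else pvAddSeq k iw n (seqs ++ [iw])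

def pvSeqsA (ws : List String) (k : Int) : List (List String) :=
  (PySem.List.pyRange 0 ((ws.length : Int) - k) 1).foldl
    (fun seqs w => pvAddSeq k (pvInitWords ws k w) k.toNat seqs) []

-- pyGetD with default "": on executed inputs every such index is in range (an s in
-- sequences never has '$' last, so Python's s[k-i+1] on the i=1 branch is never reached)
def pvNumEqual (ws : List String) (k : Int) (s : List String) (w : Int) : Int :=
  (PySem.List.pyRange 1 (k + 1) 1).foldl
    (fun ne i =>
      if PySem.List.pyGetD s (k - i) "" = "$" then
        if PySem.List.pyGetD s (k - i + 1) "" = "$" then ne + 1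
        else if 1 < i ∧ pvLastPunct (PySem.List.pyGetD ws (w - i) "") = true then ne + 1
        else ne
      else if PySem.List.pyGetD ws (w - i) "" = PySem.List.pyGetD s (k - i) "" then ne + 1
      else ne)
    0

def pvFollowA (ws : List String) (k : Int) (s : List String) : List String :=
  (PySem.List.pyRange 0 (ws.length : Int) 1).foldl
    (fun fw w => if pvNumEqual ws k s w = k then fw ++ [PySem.List.pyGetD ws w ""] else fw) []

def markov_model (text : String) (k : Int) : List (List String × List String) :=
  let words := pvWords text
  ((pvSeqsA words k).foldl
      (fun model s => model.insert s (pvFollowA words k s))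
      ((PySem.Dict.empty).insert (pvDollars k) (pvFirstA words))).items

-- ===== PORT B =====
def pvFirstB (ws : List String) : List String :=
  ((PySem.List.pyRange 0 ((ws.length : Int) - 1) 1).filter
      (fun w => pvLastPunct (PySem.List.pyGetD ws (w - 1) ""))).map
    (fun w => PySem.List.pyGetD ws w "")

def pvSeqsBStep (ws : List String) (k : Int)
    (sp : PySem.Set (List String) × List (List String)) (w : Int) :
    PySem.Set (List String) × List (List String) :=
  let j := (PySem.List.pyRange 0 k 1).foldl
    (fun j index => if pvLastPunct (PySem.List.pyGetD ws (w + index) "") then index + 1 else j) 0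
  let s := PySem.List.pyRepeat ["$"] j ++ PySem.List.slice ws (some (w + j)) (some (w + k))
  if 0 < k ∧ pvLastPunct (PySem.List.pyGetD s (-1) "") = false ∧ PySem.Set.contains sp.1 s = false
  then (PySem.Set.add sp.1 s, sp.2 ++ [s]) else sp

def pvSeqsB (ws : List String) (k : Int) : PySem.Set (List String) × List (List String) :=
  (PySem.List.pyRange 0 ((ws.length : Int) - k) 1).foldl (pvSeqsBStep ws k) (PySem.Set.empty, [])

def pvCands (ws : List String) (k : Int) (w : Int) : List (List String) :=
  (PySem.List.pyRange 0 k 1).foldl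
    (fun cs j =>
      if j = 0 ∨ pvLastPunct (PySem.List.pyGetD ws (w - k + j - 1) "") = true then
        if (PySem.List.pyRepeat ["$"] j ++
              (PySem.List.pyRange 0 (k - j) 1).map (fun t => PySem.List.pyGetD ws (w - k + j + t) "")) ∈ cs
        then cs
        else cs ++ [PySem.List.pyRepeat ["$"] j ++
              (PySem.List.pyRange 0 (k - j) 1).map (fun t => PySem.List.pyGetD ws (w - k + j + t) "")]
      else cs)
    []

def pvFollowersB (ws : List String) (k : Int) (sequences : List (List String)) :
    PySem.Dict (List String) (List String) :=
  let f0 := sequences.foldl (fun d s => d.insert s []) PySem.Dict.empty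
  if sequences = [] then f0 else
    (PySem.List.pyRange 0 (ws.length : Int) 1).foldl
      (fun d w =>
        (pvCands ws k w).foldl
          (fun d c => if d.contains c then d.modify c [] (· ++ [PySem.List.pyGetD ws w ""]) else d) d)
      f0

def markov_model_alt (text : String) (k : Int) : List (List String × List String) :=
  let words := pvWords text
  let sequences := (pvSeqsB words k).2
  let followers := pvFollowersB words k sequences
  (sequences.foldl (fun m s => m.insert s (followers.getD s []))
      ((PySem.Dict.empty).insert (PySem.List.pyRepeat ["$"] k) (pvFirstB words))).items

-- ===== PRECONDITION & SPEC =====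
def Spec_markov_model (text : String) (k : Int) (out : List (List String × List String)) : Prop := out = markov_model_alt text k
instance (text : String) (k : Int) (out : List (List String × List String)) : Decidable (Spec_markov_model text k out) := by unfold Spec_markov_model; infer_instance

-- ===== CLAIM (what is proved, stated in full; the proofs are below) =====
def Claim_equal_markov_model : Prop := ∀ (text : String) (k : Int), Dom_markov_model text k → Spec_markov_model text k (markov_model text k)


-- ===== LEMMAS AND PROOFS =====

-- '$'-tuples -----------------------------------------------------------------
theorem pvDollars_eq (m : Int) : pvDollars m = List.replicate m.toNat "$" := by
  simp [pvDollars, PySem.List.length_pyRange_one]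

theorem pvRepeat_dollar (m : Int) : PySem.List.pyRepeat ["$"] m = List.replicate m.toNat "$" := by
  simp [PySem.List.pyRepeat_singleton]

theorem pvLastPunct_dollar : pvLastPunct "$" = true := by decide

-- first words ----------------------------------------------------------------
theorem pvFirst_eq (ws : List String) : pvFirstA ws = pvFirstB ws := by
  unfold pvFirstA pvFirstB
  rw [PySem.List.foldl_append_if]
  simp

-- characterisation of A's initWords window scan ------------------------------
theorem pvInitWords_char (ws : List String) (K : Nat) (w : Int) :
    ∃ j : Nat, j ≤ K ∧
      pvInitWords ws (K : Int) w =
        List.replicate j "$" ++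
          (PySem.List.pyRange (w + j) (w + K) 1).map (fun t => PySem.List.pyGetD ws t "") ∧
      (PySem.List.pyRange 0 (K : Int) 1).foldl
          (fun j index => if pvLastPunct (PySem.List.pyGetD ws (w + index) "") then index + 1 else j) 0
        = (j : Int) ∧
      (∀ p : Nat, j ≤ p → p < K → pvLastPunct (PySem.List.pyGetD ws (w + p) "") = false) := by
  induction K with
  | zero =>
      refine ⟨0, le_refl 0, ?_, ?_, ?_⟩
      · simp [pvInitWords, PySem.List.pyRange_one_eq_nil]
      · simp [PySem.List.pyRange_one_eq_nil]
      · intro p h1 h2; omega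
  | succ K ih =>
      obtain ⟨j, hjK, hA, hB, hp⟩ := ih
      have hsplit : PySem.List.pyRange 0 ((K : Int) + 1) 1
          = PySem.List.pyRange 0 (K : Int) 1 ++ [(K : Int)] :=
        PySem.List.pyRange_one_succ_right (by positivity)
      by_cases hlast : pvLastPunct (PySem.List.pyGetD ws (w + (K : Int)) "") = true
      · refine ⟨K + 1, le_refl _, ?_, ?_, ?_⟩
        · unfold pvInitWords
          push_cast
          rw [hsplit, List.foldl_append]
          simp only [List.foldl_cons, List.foldl_nil]
          rw [if_pos hlast, pvDollars_eq]
          have h1 : ((K : Int) + 1).toNat = K + 1 := by omega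
          rw [h1, PySem.List.pyRange_one_eq_nil (by omega), List.map_nil, List.append_nil]
        · push_cast
          rw [hsplit, List.foldl_append]
          simp only [List.foldl_cons, List.foldl_nil]
          rw [if_pos hlast]
        · intro p h1 h2; omega
      · refine ⟨j, by omega, ?_, ?_, ?_⟩
        · unfold pvInitWords at hA ⊢
          push_cast
          rw [hsplit, List.foldl_append, hA]
          simp only [List.foldl_cons, List.foldl_nil]
          rw [if_neg hlast]
          have hc : w + ((K : Int) + 1) = (w + (K : Int)) + 1 := by ring
          rw [hc, PySem.List.pyRange_one_succ_right (by omega), List.map_append, List.append_assoc]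
          simp
        · push_cast
          rw [hsplit, List.foldl_append, hB]
          simp only [List.foldl_cons, List.foldl_nil]
          rw [if_neg hlast]
        · intro p h1 h2
          rcases Nat.lt_or_ge p K with h | h
          · exact hp p h1 h
          · have : p = K := by omega
            subst this
            simpa using hlast

-- A's record-with-break loop adds initWords at most once ----------------------
theorem pvAddSeq_mem (k : Int) (iw : List String) (n : Nat) (seqs : List (List String))
    (hpunct : pvLastPunct (PySem.List.pyGetD iw (k - 1) "") = false) (hmem : iw ∈ seqs) :
    pvAddSeq k iw n seqs = seqs := by
  cases n with
  | zero => rfl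
  | succ n => simp [pvAddSeq, hpunct, hmem]

theorem pvAddSeq_char (k : Int) (iw : List String) (n : Nat) (hn : n ≠ 0)
    (seqs : List (List String)) :
    pvAddSeq k iw n seqs =
      if pvLastPunct (PySem.List.pyGetD iw (k - 1) "") then seqs
      else if iw ∈ seqs then seqs else seqs ++ [iw] := by
  cases n with
  | zero => omega
  | succ n =>
      simp only [pvAddSeq]
      by_cases h1 : pvLastPunct (PySem.List.pyGetD iw (k - 1) "") = true
      · simp [h1]
      · by_cases h2 : iw ∈ seqs
        · simp [h1, h2]
        · simp only [h1, h2, Bool.false_eq_true, if_false]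
          exact pvAddSeq_mem k iw n _ (by simpa using h1) (by simp)

-- slice as an index comprehension --------------------------------------------
theorem pv_slice_eq_map (ws : List String) (a b : Int) (h0 : 0 ≤ a) (hab : a ≤ b)
    (hb : b ≤ (ws.length : Int)) :
    PySem.List.slice ws (some a) (some b)
      = (PySem.List.pyRange a b 1).map (fun t => PySem.List.pyGetD ws t "") := by
  have hdrop : (PySem.List.pyRange a (ws.length : Int) 1).map (fun t => PySem.List.pyGetD ws t "")
      = List.drop a.toNat ws := by simpa using PySem.List.map_pyGetD_pyRange ws "" h0
  have hsp : PySem.List.pyRange a (ws.length : Int) 1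
      = PySem.List.pyRange a b 1 ++ PySem.List.pyRange b (ws.length : Int) 1 :=
    PySem.List.pyRange_one_append a b _ hab hb
  rw [PySem.List.slice_toNat (ha := h0) (hb := by omega)]
  rw [hsp, List.map_append] at hdrop
  rw [← hdrop]
  rw [List.take_append_of_le_length (by simp [PySem.List.length_pyRange_one]; omega)]
  rw [List.take_of_length_le (by simp [PySem.List.length_pyRange_one]; omega)]



-- the common shape of every recorded context -------------------------------
def pvShape (K : Nat) (s : List String) : Prop :=
  ∃ j : Nat, j < K ∧ s.length = K ∧
    (∀ p : Nat, p < j → s.getD p "" = "$") ∧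
    (∀ p : Nat, j ≤ p → p < K → pvLastPunct (s.getD p "") = false)

theorem pv_window_length (ws : List String) (w : Int) (j K : Nat) (hj : j ≤ K) :
    (List.replicate j "$" ++
      (PySem.List.pyRange (w + j) (w + K) 1).map (fun t => PySem.List.pyGetD ws t "")).length = K := by
  simp [PySem.List.length_pyRange_one]
  omega

theorem pv_window_getD (ws : List String) (w : Int) (j K p : Nat) (hj : j ≤ K) (hp : p < K) :
    (List.replicate j "$" ++
      (PySem.List.pyRange (w + j) (w + K) 1).map (fun t => PySem.List.pyGetD ws t "")).getD p ""
      = if p < j then "$" else PySem.List.pyGetD ws (w + p) "" := by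
  by_cases h : p < j
  · rw [if_pos h, List.getD_append _ _ _ p (by simpa using h),
      List.getD_eq_getElem _ _ (by simpa using h), List.getElem_replicate]
  · rw [if_neg h]
    have hlen : ((PySem.List.pyRange (w + j) (w + K) 1).map
        (fun t => PySem.List.pyGetD ws t "")).length = K - j := by
      simp only [List.length_map, PySem.List.length_pyRange_one]; omega
    rw [List.getD_append_right _ _ _ p (by simpa using h),
      List.getD_eq_getElem _ _ (by simp only [List.length_replicate, hlen]; omega)]
    simp only [List.getElem_map, PySem.List.getElem_pyRange_one]
    simp only [List.length_replicate]
    congr 1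
    omega

-- one window of the sequence-collection loop --------------------------------
theorem pvSeqs_step (ws : List String) (k w : Int) (hw : 0 ≤ w)
    (hwlt : w < (ws.length : Int) - k) (sA : List (List String)) (st : PySem.Set (List String))
    (hst : st = PySem.Set.ofList sA) :
    ∃ iw : List String,
      pvAddSeq k (pvInitWords ws k w) k.toNat sA =
        (if 0 < k ∧ pvLastPunct (PySem.List.pyGetD iw (-1) "") = false ∧ PySem.Set.contains st iw = false
         then sA ++ [iw] else sA) ∧
      iw = (PySem.List.pyRepeat ["$"]
              ((PySem.List.pyRange 0 k 1).foldl
                (fun j index => if pvLastPunct (PySem.List.pyGetD ws (w + index) "") then index + 1 else j) 0)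
            ++ PySem.List.slice ws
                (some (w + (PySem.List.pyRange 0 k 1).foldl
                  (fun j index => if pvLastPunct (PySem.List.pyGetD ws (w + index) "") then index + 1 else j) 0))
                (some (w + k))) ∧
      (0 < k → pvLastPunct (PySem.List.pyGetD iw (-1) "") = false → pvShape k.toNat iw) := by
  by_cases hk : 0 < k
  · -- k > 0 : the window really is scanned
    obtain ⟨K, rfl⟩ : ∃ K : Nat, (K : Int) = k := ⟨k.toNat, Int.toNat_of_nonneg hk.le⟩
    have hKpos : 0 < K := by exact_mod_cast hk
    have hKt : ((K : Int)).toNat = K := Int.toNat_natCast K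
    obtain ⟨j, hjK, hA, hB, hp⟩ := pvInitWords_char ws K w
    have hlen : (pvInitWords ws (K : Int) w).length = K := by
      rw [hA]; exact pv_window_length ws w j K hjK
    have hne : pvInitWords ws (K : Int) w ≠ [] := by
      intro hc; rw [hc] at hlen; simp at hlen; omega
    -- B computes the same window
    have hiwB : pvInitWords ws (K : Int) w = PySem.List.pyRepeat ["$"]
          ((PySem.List.pyRange 0 (K : Int) 1).foldl
            (fun j index => if pvLastPunct (PySem.List.pyGetD ws (w + index) "") then index + 1 else j) 0)
        ++ PySem.List.slice ws
            (some (w + (PySem.List.pyRange 0 (K : Int) 1).foldl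
              (fun j index => if pvLastPunct (PySem.List.pyGetD ws (w + index) "") then index + 1 else j) 0))
            (some (w + (K : Int))) := by
      rw [hB, pvRepeat_dollar,
        pv_slice_eq_map ws (w + (j : Int)) (w + (K : Int)) (by omega) (by omega) (by omega), hA]
      rw [Int.toNat_natCast]
    -- the two "last element" tests agree
    have hget : PySem.List.pyGetD (pvInitWords ws (K : Int) w) ((K : Int) - 1) ""
        = PySem.List.pyGetD (pvInitWords ws (K : Int) w) (-1) "" := by
      rw [PySem.List.pyGetD_eq_getElem _ "" (by omega) (by rw [hlen]; omega),
        PySem.List.pyGetD_neg_one _ _ hne, List.getLast_eq_getElem]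
      congr 1
      omega
    refine ⟨pvInitWords ws (K : Int) w, ?_, hiwB, ?_⟩
    · rw [hKt, pvAddSeq_char (K : Int) _ K (by omega) sA, hget, hst]
      by_cases hpunct : pvLastPunct (PySem.List.pyGetD (pvInitWords ws (K : Int) w) (-1) "") = true
      · rw [if_pos hpunct, if_neg (by simp [hpunct])]
      · simp only [Bool.not_eq_true] at hpunct
        rw [if_neg (by simp [hpunct])]
        by_cases hmem : pvInitWords ws (K : Int) w ∈ sA
        · rw [if_pos hmem, if_neg (by
            intro hc
            rw [(PySem.Set.contains_iff _ _).mpr ((PySem.Set.mem_ofList _ _).mpr hmem)] at hc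
            simp at hc)]
        · rw [if_neg hmem, if_pos ⟨hk, hpunct, Bool.eq_false_iff.mpr (fun hc =>
            hmem ((PySem.Set.mem_ofList _ _).mp ((PySem.Set.contains_iff _ _).mp hc)))⟩]
    · -- shape of a recorded window
      intro _ hpunct
      have hjlt : j < K := by
        rcases Nat.lt_or_ge j K with h | h
        · exact h
        · exfalso
          have hd : (pvInitWords ws (K : Int) w).getD (K - 1) "" = "$" := by
            rw [hA, pv_window_getD ws w j K (K - 1) hjK (by omega), if_pos (by omega)]
          have hgd : PySem.List.pyGetD (pvInitWords ws (K : Int) w) (-1) "" = "$" := by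
            rw [← hget]
            have hc : (K : Int) - 1 = ((K - 1 : Nat) : Int) := by omega
            rw [hc, PySem.List.pyGetD_natCast, hd]
          rw [hgd, pvLastPunct_dollar] at hpunct
          simp at hpunct
      rw [hKt]
      refine ⟨j, hjlt, hlen, ?_, ?_⟩
      · intro p hpj
        rw [hA, pv_window_getD ws w j K p hjK (by omega), if_pos hpj]
      · intro p h1 h2
        rw [hA, pv_window_getD ws w j K p hjK h2, if_neg (by omega)]
        exact hp p h1 h2
  · -- k ≤ 0 : nothing is scanned and nothing is recorded
    have hK0 : k.toNat = 0 := by omega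
    refine ⟨_, ?_, rfl, ?_⟩
    · rw [hK0]
      show sA = _
      rw [if_neg (by intro hc; exact hk hc.1)]
    · intro hc
      exact absurd hc hk

-- the collection loops of A and B agree, and every recorded context is shaped
theorem pvSeqs_inv (ws : List String) (k : Int) (l : List Int)
    (hl : ∀ w ∈ l, 0 ≤ w ∧ w < (ws.length : Int) - k)
    (sA : List (List String)) (st : PySem.Set (List String) × List (List String))
    (h2 : st.2 = sA) (h1 : st.1 = PySem.Set.ofList sA) (hnd : sA.Nodup)
    (hsh : ∀ s ∈ sA, pvShape k.toNat s)
    (hne : sA ≠ [] → 0 < k ∧ k < (ws.length : Int)) :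
    (l.foldl (pvSeqsBStep ws k) st).2
      = l.foldl (fun seqs w => pvAddSeq k (pvInitWords ws k w) k.toNat seqs) sA ∧
    (l.foldl (pvSeqsBStep ws k) st).1
      = PySem.Set.ofList (l.foldl (fun seqs w => pvAddSeq k (pvInitWords ws k w) k.toNat seqs) sA) ∧
    (l.foldl (fun seqs w => pvAddSeq k (pvInitWords ws k w) k.toNat seqs) sA).Nodup ∧
    (∀ s ∈ l.foldl (fun seqs w => pvAddSeq k (pvInitWords ws k w) k.toNat seqs) sA, pvShape k.toNat s) ∧
    ((l.foldl (fun seqs w => pvAddSeq k (pvInitWords ws k w) k.toNat seqs) sA) ≠ [] →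
      0 < k ∧ k < (ws.length : Int)) := by
  induction l generalizing sA st with
  | nil => exact ⟨h2, by simp [h1], hnd, hsh, hne⟩
  | cons w l ihl =>
      obtain ⟨hw, hwlt⟩ := hl w (by simp)
      obtain ⟨iw, hstep, hiw, hshape⟩ := pvSeqs_step ws k w hw hwlt sA st.1 h1
      have hstepB : pvSeqsBStep ws k st w =
          if 0 < k ∧ pvLastPunct (PySem.List.pyGetD iw (-1) "") = false ∧
              PySem.Set.contains st.1 iw = false
          then (PySem.Set.add st.1 iw, st.2 ++ [iw]) else st := by
        simp only [pvSeqsBStep]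
        rw [← hiw]
      simp only [List.foldl_cons, hstepB, hstep]
      by_cases hcond : 0 < k ∧ pvLastPunct (PySem.List.pyGetD iw (-1) "") = false ∧
          PySem.Set.contains st.1 iw = false
      · rw [if_pos hcond, if_pos hcond]
        have hnotmem : iw ∉ sA := by
          intro hmem
          have := (PySem.Set.contains_iff st.1 iw).mpr (by rw [h1]; exact (PySem.Set.mem_ofList _ _).mpr hmem)
          rw [hcond.2.2] at this
          simp at this
        exact ihl (fun x hx => hl x (by simp [hx])) (sA ++ [iw])
            (PySem.Set.add st.1 iw, st.2 ++ [iw]) (by simp [h2])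
            (by show PySem.Set.add st.1 iw = _
                rw [PySem.Set.ofList_append_singleton, h1])
            (by simp [List.nodup_append, hnd]
                intro a ha hc
                rw [hc] at ha
                exact hnotmem ha)
            (by intro s hs
                rcases List.mem_append.mp hs with h | h
                · exact hsh s h
                · rw [List.mem_singleton.mp h]
                  exact hshape hcond.1 hcond.2.1)
            (by intro _
                exact ⟨hcond.1, by omega⟩)
      · rw [if_neg hcond, if_neg hcond]
        exact ihl (fun x hx => hl x (by simp [hx])) sA st h2 h1 hnd hsh hne

theorem pvSeqs_eq (ws : List String) (k : Int) :
    (pvSeqsB ws k).2 = pvSeqsA ws k ∧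
    (pvSeqsA ws k).Nodup ∧
    (∀ s ∈ pvSeqsA ws k, pvShape k.toNat s) ∧
    (pvSeqsA ws k ≠ [] → 0 < k ∧ k < (ws.length : Int)) := by
  have h := pvSeqs_inv ws k (PySem.List.pyRange 0 ((ws.length : Int) - k) 1)
    (fun w hw => by constructor <;> [exact (PySem.List.mem_pyRange_one.mp hw).1;
                                     exact (PySem.List.mem_pyRange_one.mp hw).2])
    [] (PySem.Set.empty, []) rfl rfl List.nodup_nil (by simp) (by simp)
  exact ⟨h.1, h.2.2.1, h.2.2.2.1, h.2.2.2.2⟩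


-- the candidate-context list of one position ---------------------------------
theorem pv_cands_fold_nodup (l : List Int) (P : Int → Prop) [DecidablePred P]
    (c : Int → List String) (cs0 : List (List String)) (h0 : cs0.Nodup) :
    (l.foldl (fun cs j => if P j then (if c j ∈ cs then cs else cs ++ [c j]) else cs) cs0).Nodup := by
  induction l generalizing cs0 with
  | nil => exact h0
  | cons j l ih =>
      simp only [List.foldl_cons]
      by_cases hp : P j
      · by_cases hm : c j ∈ cs0
        · simp only [hp, hm, if_pos]
          exact ih cs0 h0
        · simp only [hp, hm, if_pos, if_false]
          refine ih _ ?_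
          simp [List.nodup_append, h0]
          intro a ha hc
          rw [hc] at ha
          exact hm ha
      · simp only [hp, if_false]
        exact ih cs0 h0

theorem pv_cands_fold_mem (l : List Int) (P : Int → Prop) [DecidablePred P]
    (c : Int → List String) (cs0 : List (List String)) (x : List String) :
    x ∈ l.foldl (fun cs j => if P j then (if c j ∈ cs then cs else cs ++ [c j]) else cs) cs0
      ↔ x ∈ cs0 ∨ ∃ j ∈ l, P j ∧ x = c j := by
  induction l generalizing cs0 with
  | nil => simp
  | cons j l ih =>
      simp only [List.foldl_cons]
      by_cases hp : P j
      · by_cases hm : c j ∈ cs0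
        · simp only [hp, hm, if_pos, ih]
          constructor
          · rintro (h | h)
            · exact Or.inl h
            · obtain ⟨j', hj', hP, hx⟩ := h
              exact Or.inr ⟨j', by simp [hj'], hP, hx⟩
          · rintro (h | ⟨j', hj', hP, hx⟩)
            · exact Or.inl h
            · rcases List.mem_cons.mp hj' with h | h
              · subst h; exact Or.inl (hx ▸ hm)
              · exact Or.inr ⟨j', h, hP, hx⟩
        · simp only [hp, hm, if_pos, if_false, ih, List.mem_append,
            List.mem_singleton]
          constructor
          · rintro ((h | h) | h)
            · exact Or.inl h
            · exact Or.inr ⟨j, by simp, hp, h⟩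
            · obtain ⟨j', hj', hP, hx⟩ := h
              exact Or.inr ⟨j', by simp [hj'], hP, hx⟩
          · rintro (h | ⟨j', hj', hP, hx⟩)
            · exact Or.inl (Or.inl h)
            · rcases List.mem_cons.mp hj' with h | h
              · subst h; exact Or.inl (Or.inr hx)
              · exact Or.inr ⟨j', h, hP, hx⟩
      · simp only [hp, if_false, ih]
        constructor
        · rintro (h | h)
          · exact Or.inl h
          · obtain ⟨j', hj', hP, hx⟩ := h
            exact Or.inr ⟨j', by simp [hj'], hP, hx⟩
        · rintro (h | ⟨j', hj', hP, hx⟩)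
          · exact Or.inl h
          · rcases List.mem_cons.mp hj' with h | h
            · subst h; exact absurd hP hp
            · exact Or.inr ⟨j', h, hP, hx⟩

theorem pvCands_nodup (ws : List String) (k w : Int) : (pvCands ws k w).Nodup := by
  unfold pvCands
  exact pv_cands_fold_nodup _ _ _ _ List.nodup_nil

theorem pvCands_mem (ws : List String) (k w : Int) (x : List String) :
    x ∈ pvCands ws k w ↔
      ∃ j ∈ PySem.List.pyRange 0 k 1,
        (j = 0 ∨ pvLastPunct (PySem.List.pyGetD ws (w - k + j - 1) "") = true) ∧
        x = PySem.List.pyRepeat ["$"] j ++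
          (PySem.List.pyRange 0 (k - j) 1).map (fun t => PySem.List.pyGetD ws (w - k + j + t) "") := by
  unfold pvCands
  rw [pv_cands_fold_mem]
  simp


-- dictionary bookkeeping for B's follower pass -------------------------------
theorem pv_f0_contains (l : List (List String)) (d : PySem.Dict (List String) (List String))
    (s : List String) :
    (l.foldl (fun d s => d.insert s []) d).contains s = (d.contains s || decide (s ∈ l)) := by
  induction l generalizing d with
  | nil => simp
  | cons x l ih =>
      simp only [List.foldl_cons, ih, PySem.Dict.contains_insert]
      by_cases h : s = x <;> by_cases h2 : s ∈ l <;> simp [h, h2]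

theorem pv_f0_getD (l : List (List String)) (d : PySem.Dict (List String) (List String))
    (s : List String) :
    (l.foldl (fun d s => d.insert s ([] : List String)) d).getD s []
      = if s ∈ l then [] else d.getD s [] := by
  induction l generalizing d with
  | nil => simp
  | cons x l ih =>
      simp only [List.foldl_cons, ih]
      by_cases h2 : s ∈ l
      · simp [h2]
      · by_cases h : s = x
        · subst h
          simp [h2, PySem.Dict.getD_insert_self]
        · simp [h2, h, PySem.Dict.getD_insert_of_ne d [] [] h]

theorem pv_cstep_contains (cs : List (List String)) (d : PySem.Dict (List String) (List String))
    (x : String) (s : List String) :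
    (cs.foldl (fun d c => if d.contains c then d.modify c [] (· ++ [x]) else d) d).contains s
      = d.contains s := by
  induction cs generalizing d with
  | nil => rfl
  | cons c cs ih =>
      simp only [List.foldl_cons]
      by_cases h : d.contains c = true
      · rw [if_pos h, ih, PySem.Dict.contains_modify]
        by_cases hsc : s = c
        · subst hsc; simp [h]
        · simp [hsc]
      · rw [if_neg h, ih]

theorem pv_cstep_getD_notmem (cs : List (List String)) (d : PySem.Dict (List String) (List String))
    (x : String) (s : List String) (hs : s ∉ cs) :
    (cs.foldl (fun d c => if d.contains c then d.modify c [] (· ++ [x]) else d) d).getD s []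
      = d.getD s [] := by
  induction cs generalizing d with
  | nil => rfl
  | cons c cs ih =>
      have hsc : s ≠ c := fun h => hs (by simp [h])
      simp only [List.foldl_cons]
      by_cases h : d.contains c = true
      · rw [if_pos h, ih _ (fun h => hs (by simp [h])), PySem.Dict.getD_modify_of_ne _ _ _ hsc]
      · rw [if_neg h, ih _ (fun h => hs (by simp [h]))]

theorem pv_cstep_getD (cs : List (List String)) (d : PySem.Dict (List String) (List String))
    (x : String) (s : List String) (hnd : cs.Nodup) :
    (cs.foldl (fun d c => if d.contains c then d.modify c [] (· ++ [x]) else d) d).getD s []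
      = d.getD s [] ++ (if d.contains s = true ∧ s ∈ cs then [x] else []) := by
  induction cs generalizing d with
  | nil => simp
  | cons c cs ih =>
      have hndt : cs.Nodup := (List.nodup_cons.mp hnd).2
      simp only [List.foldl_cons]
      by_cases h : d.contains c = true
      · rw [if_pos h]
        have hcon : (d.modify c [] (· ++ [x])).contains s = d.contains s := by
          rw [PySem.Dict.contains_modify]
          by_cases hsc : s = c
          · subst hsc; simp [h]
          · simp [hsc]
        by_cases hsc : s = c
        · subst hsc
          rw [pv_cstep_getD_notmem cs _ x s (List.nodup_cons.mp hnd).1,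
            PySem.Dict.getD_modify_self]
          simp [h]
        · rw [ih _ hndt, PySem.Dict.getD_modify_of_ne _ _ _ hsc, hcon]
          by_cases hm : s ∈ cs <;> simp [hsc, hm]
      · rw [if_neg h, ih _ hndt]
        by_cases hsc : s = c
        · subst hsc
          have : d.contains s ≠ true := h
          by_cases hm : s ∈ cs <;> simp [hm, this]
        · by_cases hm : s ∈ cs <;> simp [hsc, hm]

theorem pv_wfold_getD (ws : List String) (k : Int) (l : List Int)
    (d : PySem.Dict (List String) (List String)) (s : List String) (hc : d.contains s = true) :
    (l.foldl (fun d w =>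
        (pvCands ws k w).foldl
          (fun d c => if d.contains c then d.modify c [] (· ++ [PySem.List.pyGetD ws w ""]) else d) d)
      d).getD s []
      = d.getD s [] ++
        (l.filter (fun w => decide (s ∈ pvCands ws k w))).map (fun w => PySem.List.pyGetD ws w "") := by
  induction l generalizing d with
  | nil => simp
  | cons w l ih =>
      simp only [List.foldl_cons]
      rw [ih _ (by rw [pv_cstep_contains]; exact hc),
        pv_cstep_getD _ _ _ _ (pvCands_nodup ws k w)]
      by_cases hm : s ∈ pvCands ws k w
      · simp [hm, hc, List.append_assoc]
      · simp [hm]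


-- A's per-position match count, as a predicate --------------------------------
def pvMatch (ws : List String) (k : Int) (s : List String) (w : Int) (i : Int) : Bool :=
  if PySem.List.pyGetD s (k - i) "" = "$" then
    (decide (PySem.List.pyGetD s (k - i + 1) "" = "$") ||
      (decide (1 < i) && pvLastPunct (PySem.List.pyGetD ws (w - i) "")))
  else decide (PySem.List.pyGetD ws (w - i) "" = PySem.List.pyGetD s (k - i) "")

theorem pvNumEqual_eq (ws : List String) (k : Int) (s : List String) (w : Int) :
    pvNumEqual ws k s w = ((PySem.List.pyRange 1 (k + 1) 1).countP (pvMatch ws k s w) : Int) := by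
  unfold pvNumEqual
  have hcg : List.foldl
      (fun ne i =>
        if PySem.List.pyGetD s (k - i) "" = "$" then
          if PySem.List.pyGetD s (k - i + 1) "" = "$" then ne + 1
          else if 1 < i ∧ pvLastPunct (PySem.List.pyGetD ws (w - i) "") = true then ne + 1 else ne
        else if PySem.List.pyGetD ws (w - i) "" = PySem.List.pyGetD s (k - i) "" then ne + 1 else ne)
      0 (PySem.List.pyRange 1 (k + 1) 1)
      = List.foldl (fun ne i => if pvMatch ws k s w i then ne + 1 else ne) (0 : Int)
          (PySem.List.pyRange 1 (k + 1) 1) := by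
    apply PySem.List.foldl_congr_mem
    intro acc i _
    unfold pvMatch
    by_cases hA : PySem.List.pyGetD s (k - i) "" = "$"
    · by_cases hB : PySem.List.pyGetD s (k - i + 1) "" = "$"
      · simp [hA, hB]
      · by_cases hC : 1 < i ∧ pvLastPunct (PySem.List.pyGetD ws (w - i) "") = true
        · simp [hA, hB, hC.1, hC.2]
        · rcases Decidable.not_and_iff_not_or_not.mp hC with h | h <;>
            simp [hA, hB, h]
    · by_cases hE : PySem.List.pyGetD ws (w - i) "" = PySem.List.pyGetD s (k - i) "" <;>
        simp [hA, hE]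
  rw [hcg]
  rw [PySem.List.foldl_if_add_one]
  simp

theorem pvNumEqual_eq_k_iff (ws : List String) (k : Int) (s : List String) (w : Int) (hk : 0 < k) :
    pvNumEqual ws k s w = k ↔
      ∀ i ∈ PySem.List.pyRange 1 (k + 1) 1, pvMatch ws k s w i = true := by
  rw [pvNumEqual_eq]
  have hlen : (PySem.List.pyRange 1 (k + 1) 1).length = k.toNat := by
    rw [PySem.List.length_pyRange_one]; omega
  have hle := List.countP_le_length (p := pvMatch ws k s w) (l := PySem.List.pyRange 1 (k + 1) 1)
  rw [hlen] at hle
  constructor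
  · intro h
    apply List.countP_eq_length.mp
    rw [hlen]
    omega
  · intro h
    rw [List.countP_eq_length.mpr h, hlen]
    omega

-- the value of one candidate context, element by element ----------------------
theorem pv_cand_length (ws : List String) (w : Int) (K jN : Nat) (hj : jN ≤ K) :
    (PySem.List.pyRepeat ["$"] ((jN : Nat) : Int) ++
      (PySem.List.pyRange 0 ((K : Int) - (jN : Int)) 1).map
        (fun t => PySem.List.pyGetD ws (w - (K : Int) + (jN : Int) + t) "")).length = K := by
  rw [pvRepeat_dollar, Int.toNat_natCast]
  simp [PySem.List.length_pyRange_one]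
  omega

theorem pv_cand_getD (ws : List String) (w : Int) (K jN p : Nat) (hj : jN ≤ K) (hp : p < K) :
    (PySem.List.pyRepeat ["$"] ((jN : Nat) : Int) ++
      (PySem.List.pyRange 0 ((K : Int) - (jN : Int)) 1).map
        (fun t => PySem.List.pyGetD ws (w - (K : Int) + (jN : Int) + t) "")).getD p ""
      = if p < jN then "$" else PySem.List.pyGetD ws (w - (K : Int) + (p : Int)) "" := by
  rw [pvRepeat_dollar, Int.toNat_natCast]
  by_cases h : p < jN
  · rw [if_pos h, List.getD_append _ _ _ p (by simpa using h),
      List.getD_eq_getElem _ _ (by simpa using h), List.getElem_replicate]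
  · rw [if_neg h]
    have hlen : ((PySem.List.pyRange 0 ((K : Int) - (jN : Int)) 1).map
        (fun t => PySem.List.pyGetD ws (w - (K : Int) + (jN : Int) + t) "")).length = K - jN := by
      simp only [List.length_map, PySem.List.length_pyRange_one]; omega
    rw [List.getD_append_right _ _ _ p (by simpa using h),
      List.getD_eq_getElem _ _ (by simp only [List.length_replicate, hlen]; omega)]
    simp only [List.getElem_map, PySem.List.getElem_pyRange_one]
    simp only [List.length_replicate]
    congr 1
    omega

theorem pv_list_eq_of_getD (a b : List String) (hlen : a.length = b.length)
    (h : ∀ p : Nat, p < a.length → a.getD p "" = b.getD p "") : a = b := by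
  apply List.ext_getElem hlen
  intro i h1 h2
  have := h i h1
  rwa [List.getD_eq_getElem _ _ h1, List.getD_eq_getElem _ _ h2] at this

-- pvMatch at i, written at position p = K - i ---------------------------------
theorem pvMatch_char (ws : List String) (K : Nat) (s : List String) (w : Int) (i : Int)
    (h1 : 1 ≤ i) (h2 : i ≤ (K : Int)) :
    pvMatch ws (K : Int) s w i =
      (if s.getD (K - i.toNat) "" = "$" then
        (decide (s.getD (K - i.toNat + 1) "" = "$") ||
          (decide (1 < i) && pvLastPunct (PySem.List.pyGetD ws (w - i) "")))
       else decide (PySem.List.pyGetD ws (w - i) "" = s.getD (K - i.toNat) "")) := by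
  unfold pvMatch
  have e1 : (K : Int) - i = ((K - i.toNat : Nat) : Int) := by omega
  have e2 : (K : Int) - i + 1 = ((K - i.toNat + 1 : Nat) : Int) := by omega
  rw [e2, PySem.List.pyGetD_natCast, e1, PySem.List.pyGetD_natCast]

-- the heart: A's k-fold match test picks exactly B's candidate contexts -------
set_option maxHeartbeats 1000000 in
theorem pv_match_iff (ws : List String) (K : Nat) (s : List String) (w : Int) (hK : 0 < K)
    (hsh : pvShape K s) :
    (∀ i ∈ PySem.List.pyRange 1 ((K : Int) + 1) 1, pvMatch ws (K : Int) s w i = true)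
      ↔ s ∈ pvCands ws (K : Int) w := by
  obtain ⟨j', hj'K, hlen, hpre, htail⟩ := hsh
  have hne' : ∀ p, j' ≤ p → p < K → s.getD p "" ≠ "$" := by
    intro p hp1 hp2 hc
    have := htail p hp1 hp2
    rw [hc, pvLastPunct_dollar] at this
    simp at this
  constructor
  · intro hall
    have hA1 : ∀ p, j' ≤ p → p < K →
        PySem.List.pyGetD ws (w - (K : Int) + (p : Int)) "" = s.getD p "" := by
      intro p hp1 hp2
      have hm := hall ((K - p : Nat) : Int)
        (PySem.List.mem_pyRange_one.mpr ⟨by omega, by omega⟩)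
      rw [pvMatch_char ws K s w _ (by omega) (by omega)] at hm
      have ep : K - (((K - p : Nat) : Int)).toNat = p := by omega
      rw [ep, if_neg (hne' p hp1 hp2)] at hm
      have ei : w - ((K - p : Nat) : Int) = w - (K : Int) + (p : Int) := by omega
      rw [ei] at hm
      simpa using hm
    have hA2 : j' ≠ 0 →
        pvLastPunct (PySem.List.pyGetD ws (w - (K : Int) + (j' : Int) - 1) "") = true := by
      intro hj0
      have hm := hall ((K - (j' - 1) : Nat) : Int)
        (PySem.List.mem_pyRange_one.mpr ⟨by omega, by omega⟩)
      rw [pvMatch_char ws K s w _ (by omega) (by omega)] at hm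
      have ep : K - (((K - (j' - 1) : Nat) : Int)).toNat = j' - 1 := by omega
      rw [ep, if_pos (hpre (j' - 1) (by omega))] at hm
      have e : j' - 1 + 1 = j' := by omega
      rw [e] at hm
      have hg : decide (s.getD j' "" = "$") = false :=
        decide_eq_false (hne' j' le_rfl hj'K)
      have ei : w - ((K - (j' - 1) : Nat) : Int) = w - (K : Int) + (j' : Int) - 1 := by omega
      rw [ei, hg, Bool.false_or] at hm
      simp only [Bool.and_eq_true, decide_eq_true_eq] at hm
      exact hm.2
    rw [pvCands_mem]
    refine ⟨(j' : Int), PySem.List.mem_pyRange_one.mpr ⟨by omega, by omega⟩, ?_, ?_⟩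
    · by_cases hj0 : j' = 0
      · exact Or.inl (by simp [hj0])
      · exact Or.inr (hA2 hj0)
    · refine (pv_list_eq_of_getD _ _ ?_ ?_).symm
      · rw [pv_cand_length ws w K j' (by omega), hlen]
      · intro p hp
        rw [pv_cand_length ws w K j' (by omega)] at hp
        rw [pv_cand_getD ws w K j' p (by omega) hp]
        by_cases h : p < j'
        · rw [if_pos h, hpre p h]
        · rw [if_neg h, hA1 p (by omega) hp]
  · intro hs
    rw [pvCands_mem] at hs
    obtain ⟨jI, hjr, hvalid, hxeq⟩ := hs
    obtain ⟨hj0, hjK⟩ := PySem.List.mem_pyRange_one.mp hjr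
    obtain ⟨jN, rfl⟩ : ∃ jN : Nat, (jN : Int) = jI := ⟨jI.toNat, Int.toNat_of_nonneg hj0⟩
    have hjNK : jN ≤ K := by omega
    have hpre2 : ∀ p, p < jN → s.getD p "" = "$" := by
      intro p hp
      rw [hxeq, pv_cand_getD ws w K jN p hjNK (lt_of_lt_of_le hp hjNK), if_pos hp]
    have htail2 : ∀ p, jN ≤ p → p < K →
        s.getD p "" = PySem.List.pyGetD ws (w - (K : Int) + (p : Int)) "" := by
      intro p hp1 hp2
      rw [hxeq, pv_cand_getD ws w K jN p hjNK hp2, if_neg (by omega)]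
    have hjj : jN ≤ j' :=
      Nat.le_of_not_lt (fun h => hne' j' le_rfl hj'K (hpre2 j' h))
    intro i hi
    obtain ⟨hi1, hi2⟩ := PySem.List.mem_pyRange_one.mp hi
    rw [pvMatch_char ws K s w i hi1 (by omega)]
    have hpK : K - i.toNat < K := by omega
    have hwi : w - i = w - (K : Int) + ((K - i.toNat : Nat) : Int) := by omega
    by_cases hp1 : K - i.toNat < j'
    · rw [if_pos (hpre _ hp1)]
      by_cases hp2 : K - i.toNat + 1 < j'
      · rw [hpre _ hp2]
        simp
      · have hpj : K - i.toNat = j' - 1 := by omega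
        have hpstep : pvLastPunct (PySem.List.pyGetD ws (w - i) "") = true := by
          by_cases hjeq : jN = j'
          · rcases hvalid with h0 | hp
            · exfalso; omega
            · have e : w - ((K : Int)) + ((jN : Nat) : Int) - 1 = w - i := by omega
              rw [e] at hp
              exact hp
          · have h := htail2 (K - i.toNat) (by omega) hpK
            rw [hpre _ hp1] at h
            rw [hwi, ← h, pvLastPunct_dollar]
        have hi1' : 1 < i := by omega
        simp [hpstep, hi1']
    · rw [if_neg (hne' _ (by omega) hpK)]
      have h := htail2 (K - i.toNat) (by omega) hpK
      rw [hwi, ← h]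
      simp


-- follower lists agree on every recorded context ------------------------------
theorem pv_follow_eq (ws : List String) (k : Int) (seqs : List (List String)) (s : List String)
    (hs : s ∈ seqs) (hk : 0 < k) (hsh : pvShape k.toNat s) :
    pvFollowA ws k s = (pvFollowersB ws k seqs).getD s [] := by
  have hne : seqs ≠ [] := by
    intro h
    rw [h] at hs
    simp at hs
  simp only [pvFollowersB]
  rw [if_neg hne]
  have hc : (seqs.foldl (fun d s => d.insert s ([] : List String)) PySem.Dict.empty).contains s = true := by
    rw [pv_f0_contains]
    simp [hs]
  rw [pv_wfold_getD ws k _ _ s hc, pv_f0_getD, if_pos hs]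
  simp only [List.nil_append]
  unfold pvFollowA
  rw [PySem.List.foldl_append_ite]
  simp only [List.nil_append]
  congr 1
  apply List.filter_congr
  intro w hw
  have hK : ((k.toNat : Nat) : Int) = k := Int.toNat_of_nonneg hk.le
  have hiff := pvNumEqual_eq_k_iff ws k s w hk
  have hmi := pv_match_iff ws k.toNat s w (by omega) hsh
  rw [hK] at hmi
  exact decide_eq_decide.mpr (hiff.trans hmi)

-- the whole models agree -------------------------------------------------------
theorem pv_main (ws : List String) (k : Int) :
    ((pvSeqsA ws k).foldl (fun model s => model.insert s (pvFollowA ws k s))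
        ((PySem.Dict.empty).insert (pvDollars k) (pvFirstA ws))).items
    = ((pvSeqsB ws k).2.foldl
        (fun m s => m.insert s ((pvFollowersB ws k (pvSeqsB ws k).2).getD s []))
        ((PySem.Dict.empty).insert (PySem.List.pyRepeat ["$"] k) (pvFirstB ws))).items := by
  obtain ⟨hseq, hnd, hsh, hnonempty⟩ := pvSeqs_eq ws k
  rw [hseq, pvDollars_eq, pvRepeat_dollar, pvFirst_eq]
  by_cases hnil : pvSeqsA ws k = []
  · rw [hnil]
    simp only [List.foldl_nil]
  · obtain ⟨hk, _⟩ := hnonempty hnil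
    have hfold := PySem.List.foldl_congr_mem
      (l := pvSeqsA ws k)
      (f := fun (model : PySem.Dict (List String) (List String)) s =>
        model.insert s (pvFollowA ws k s))
      (g := fun (m : PySem.Dict (List String) (List String)) s =>
        m.insert s ((pvFollowersB ws k (pvSeqsA ws k)).getD s []))
      (init := (PySem.Dict.empty).insert (List.replicate k.toNat "$") (pvFirstB ws))
      (by
        intro acc s hsmem
        show acc.insert s (pvFollowA ws k s)
          = acc.insert s ((pvFollowersB ws k (pvSeqsA ws k)).getD s [])
        rw [pv_follow_eq ws k (pvSeqsA ws k) s hsmem hk (hsh s hsmem)])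
    rw [hfold]

-- ===== VERDICT (by name: the statement is the Claim_ definition above) =====
theorem markov_model_spec : Claim_equal_markov_model := by
  intro text k _
  show markov_model text k = markov_model_alt text k
  unfold markov_model markov_model_alt
  exact pv_main (pvWords text) k
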